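-- pv_equiv track=rewrite | github.com/babywyrm/sysadmin | hashing/py/build-list.py | build_wordlist
-- ===== SOURCE A (Python) =====
-- import itertools
-- import string
--
-- def remove_punctuation(word):
--     # Remove punctuation from the word
--     return word.translate(str.maketrans("", "", string.punctuation))
--
-- def build_wordlist(email_text):
--     # Split the email text into words
--     words = [remove_punctuation(word) for word in email_text.split()]
--
--     # Initialize an empty list to store the generated wordlist
--     wordlist = []
--
--     # Iterate through the words
--     for word in words:
--         # Add the word in both uppercase and lowercase
--         wordlist.append(word.lower())
--         wordlist.append(word.upper())
--
--     # Combine consecutive words when it makes sense (e.g., "Math is life")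
--     for i in range(len(words) - 1):
--         combined_words = words[i] + words[i + 1]
--         wordlist.append(combined_words.lower())
--         wordlist.append(combined_words.upper())
--
--     # Combine all possible two-word combinations
--     two_word_combinations = list(itertools.combinations(words, 2))
--     for combination in two_word_combinations:
--         combined_two_words = combination[0] + combination[1]
--         wordlist.append(combined_two_words.lower())
--         wordlist.append(combined_two_words.upper())
--
--     return wordlist
-- ===== SOURCE B (Python) =====
-- import string
--
-- def remove_punctuation(word):
--     return word.translate(str.maketrans("", "", string.punctuation))
--
-- def _variants(b):
--     return [b.lower(), b.upper()]
--
-- def build_wordlist(email_text):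
--     words = [remove_punctuation(w) for w in email_text.split()]
--     # Single suffix-peeling pass: one traversal of the word list builds all
--     # three sections (case variants, adjacent concatenations, all 2-word
--     # combination concatenations) at once; no itertools, no index arithmetic.
--     singles, adjacent, pairs = [], [], []
--     tail = words
--     while tail:
--         head, tail = tail[0], tail[1:]
--         singles += _variants(head)
--         if tail:
--             adjacent += _variants(head + tail[0])
--         for r in tail:
--             pairs += _variants(head + r)
--     return singles + adjacent + pairs
-- ===== Notes on version B (the rewrite author's own statement) =====
-- stated objective: alternative
-- what changed: B replaces A's three separate output loops (including the itertools.combinations pass and the index-based adjacent pass) with one suffix-peeling traversal of the word list that accumulates all three sections (singles, adjacent concatenations, pair concatenations) simultaneously and concatenates them at the end.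
import Mathlib
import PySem

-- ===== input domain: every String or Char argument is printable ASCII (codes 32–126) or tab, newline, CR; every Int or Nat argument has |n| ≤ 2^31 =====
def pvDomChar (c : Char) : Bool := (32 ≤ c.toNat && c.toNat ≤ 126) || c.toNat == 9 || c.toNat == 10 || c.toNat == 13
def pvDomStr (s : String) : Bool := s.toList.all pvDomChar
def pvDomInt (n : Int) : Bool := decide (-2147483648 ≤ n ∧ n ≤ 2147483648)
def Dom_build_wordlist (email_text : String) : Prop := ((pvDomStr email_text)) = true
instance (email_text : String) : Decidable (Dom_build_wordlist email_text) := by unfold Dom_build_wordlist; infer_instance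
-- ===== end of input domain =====

-- B builds all three output sections in one suffix-peeling traversal of the word list (alternative decomposition, same cost).

-- ===== PORT A =====
-- exact port of string.punctuation / str.translate-removal: filter out the 32 ASCII punctuation chars
def pvPunct : List Char := "!\"#$%&'()*+,-./:;<=>?@[\\]^_`{|}~".toList

def pvRemovePunct (w : String) : String :=
  String.ofList (w.toList.filter (fun c => !(pvPunct.contains c)))

def build_wordlist (email_text : String) : List String :=
  let words := (PySem.Str.split₀ email_text).map pvRemovePunct
  let wordlist : List String := []
  let wordlist := words.foldl
      (fun acc w => acc ++ [PySem.Str.lower w] ++ [PySem.Str.upper w]) wordlist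
  let wordlist := (PySem.List.pyRange 0 ((words.length : Int) - 1) 1).foldl
      (fun acc i =>
        let cw := PySem.List.pyGetD words i "" ++ PySem.List.pyGetD words (i + 1) ""
        acc ++ [PySem.Str.lower cw] ++ [PySem.Str.upper cw]) wordlist
  let wordlist := (PySem.List.combinations words 2).foldl
      (fun acc c =>
        let cw := PySem.List.pyGetD c 0 "" ++ PySem.List.pyGetD c 1 ""
        acc ++ [PySem.Str.lower cw] ++ [PySem.Str.upper cw]) wordlist
  wordlist

-- ===== PORT B =====
def pvVariants (b : String) : List String := [PySem.Str.lower b, PySem.Str.upper b]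

-- the suffix-peeling while loop of Source B: one traversal, three accumulated sections
def pvPeel : List String → List String × List String × List String
  | [] => ([], [], [])
  | head :: tail =>
    let rest := pvPeel tail
    (pvVariants head ++ rest.1,
     (match tail with | [] => [] | r :: _ => pvVariants (head ++ r)) ++ rest.2.1,
     tail.flatMap (fun r => pvVariants (head ++ r)) ++ rest.2.2)

def build_wordlist_alt (email_text : String) : List String :=
  let words := (PySem.Str.split₀ email_text).map pvRemovePunct
  let s := pvPeel words
  s.1 ++ s.2.1 ++ s.2.2

-- ===== PRECONDITION & SPEC =====
def Spec_build_wordlist (email_text : String) (out : List String) : Prop := out = build_wordlist_alt email_text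
instance (email_text : String) (out : List String) : Decidable (Spec_build_wordlist email_text out) := by unfold Spec_build_wordlist; infer_instance

-- ===== CLAIM (what is proved, stated in full; the proofs are below) =====
def Claim_equal_build_wordlist : Prop := ∀ (email_text : String), Dom_build_wordlist email_text → Spec_build_wordlist email_text (build_wordlist email_text)

-- ===== LEMMAS AND PROOFS =====

-- a loop 'acc.append(f x); acc.append(g x)' is acc ++ flatMap of the two variants
theorem pv_foldl_two {α : Type} (f g : α → String) (l : List α) (acc : List String) :
    l.foldl (fun acc x => acc ++ [f x] ++ [g x]) acc
      = acc ++ l.flatMap (fun x => [f x, g x]) := by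
  induction l generalizing acc with
  | nil => simp
  | cons a t ih => rw [List.foldl_cons, ih]; simp [List.append_assoc]

theorem pv_peel_fst (xs : List String) :
    (pvPeel xs).1 = xs.flatMap pvVariants := by
  induction xs with
  | nil => simp [pvPeel]
  | cons a t ih => simp [pvPeel, ih]

-- indexing range(len-1) with i, i+1 is zipping with the tail
theorem pv_range_adjacent (xs : List String) :
    (PySem.List.pyRange 0 ((xs.length : Int) - 1) 1).map
        (fun i => PySem.List.pyGetD xs i "" ++ PySem.List.pyGetD xs (i + 1) "")
      = (xs.zip (xs.drop 1)).map (fun p => p.1 ++ p.2) := by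
  rcases xs with _ | ⟨a, t⟩
  · simp [PySem.List.pyRange]
  · have h1 : ((a :: t).length : Int) - 1 = ((t.length : Nat) : Int) := by
      simp
    rw [h1, PySem.List.pyRange_zero_natCast]
    apply List.ext_getElem
    · simp
    · intro k hk1 hk2
      have hk : k < t.length := by simpa using hk1
      have e1 : ((k : Int) + 1) = (((k + 1 : Nat)) : Int) := by push_cast; ring
      simp only [List.getElem_map, List.getElem_range, PySem.List.pyGetD_natCast, e1]
      have hz : k < ((a :: t).zip ((a :: t).drop 1)).length := by
        simp [List.length_zip]; omega
      simp [List.getElem_zip, List.getD_eq_getElem?_getD,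
        List.getElem?_eq_getElem (by simp; omega : k < (a :: t).length),
        List.getElem?_eq_getElem (by simp; omega : k + 1 < (a :: t).length)]

theorem pv_peel_adj (xs : List String) :
    (pvPeel xs).2.1
      = (xs.zip (xs.drop 1)).flatMap (fun p => pvVariants (p.1 ++ p.2)) := by
  induction xs with
  | nil => simp [pvPeel]
  | cons a t ih =>
    rcases t with _ | ⟨b, u⟩
    · simp [pvPeel]
    · show pvVariants (a ++ b) ++ (pvPeel (b :: u)).2.1 = _
      rw [ih]; simp

theorem pv_peel_pairs (xs : List String) :
    (pvPeel xs).2.2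
      = (PySem.List.combinations xs 2).flatMap
          (fun c => pvVariants (PySem.List.pyGetD c 0 "" ++ PySem.List.pyGetD c 1 "")) := by
  induction xs with
  | nil => simp [pvPeel, PySem.List.combinations_nil_succ]
  | cons a t ih =>
    rw [show (2 : Nat) = 1 + 1 from rfl, PySem.List.combinations_cons_succ,
      PySem.List.combinations_one]
    simp only [pvPeel, List.flatMap_append, List.flatMap_map, ih]
    simp [PySem.List.pyGetD]

-- ===== VERDICT (by name: the statement is the Claim_ definition above) =====
theorem build_wordlist_spec : Claim_equal_build_wordlist := by
  intro s _
  unfold Spec_build_wordlist build_wordlist build_wordlist_alt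
  simp only [pv_foldl_two, pv_peel_fst, pv_peel_adj, pv_peel_pairs, List.nil_append,
    pvVariants]
  congr 1
  congr 1
  have h := congrArg (List.flatMap (fun b => [PySem.Str.lower b, PySem.Str.upper b]))
      (pv_range_adjacent ((PySem.Str.split₀ s).map pvRemovePunct))
  simpa [List.flatMap_map] using h
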